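-- pv_equiv track=rewrite | github.com/JonasRSV/ChristmasGame | app/santa.py | evaluate_sort
-- ===== SOURCE A (Python) =====
-- def evaluate_sort(giftorder: list) -> float:
--     max_delta = {}
--     observation = {}
--
--     score = 0
--     previous_gift = None
--     for index, gift in enumerate(giftorder):
--         if gift not in observation:
--             observation[gift] = index
--
--         if gift not in max_delta:
--             max_delta[gift] = 0
--
--         max_delta[gift] = max(max_delta[gift], index - observation[gift] - 1)
--         observation[gift] = index
--
--         if gift == previous_gift:
--             score += 100
--
--         previous_gift = gift
--
--     score += sum(max_delta.values())
--
--     return score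
-- ===== SOURCE B (Python) =====
-- def _gap_score(idx):
--     m = 0
--     for a, b in zip(idx, idx[1:]):
--         m = max(m, b - a - 1)
--     return m
--
--
-- def evaluate_sort(giftorder: list) -> float:
--     positions = {}
--     for i, g in enumerate(giftorder):
--         positions.setdefault(g, []).append(i)
--
--     score = 100 * sum(1 for a, b in zip(giftorder, giftorder[1:]) if a == b)
--     for idx in positions.values():
--         score += _gap_score(idx)
--     return score
-- ===== Notes on version B (the rewrite author's own statement) =====
-- stated objective: alternative
-- what changed: A interleaves three pieces of running state (per-gift max-gap dict, last-seen-index dict, previous-element sentinel) inside one loop; B instead groups indices per gift into a positions dict in one flat pass, counts adjacent duplicates by zipping the list with its tail, and derives each gift's max gap from its index list afterwards.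
import Mathlib
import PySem

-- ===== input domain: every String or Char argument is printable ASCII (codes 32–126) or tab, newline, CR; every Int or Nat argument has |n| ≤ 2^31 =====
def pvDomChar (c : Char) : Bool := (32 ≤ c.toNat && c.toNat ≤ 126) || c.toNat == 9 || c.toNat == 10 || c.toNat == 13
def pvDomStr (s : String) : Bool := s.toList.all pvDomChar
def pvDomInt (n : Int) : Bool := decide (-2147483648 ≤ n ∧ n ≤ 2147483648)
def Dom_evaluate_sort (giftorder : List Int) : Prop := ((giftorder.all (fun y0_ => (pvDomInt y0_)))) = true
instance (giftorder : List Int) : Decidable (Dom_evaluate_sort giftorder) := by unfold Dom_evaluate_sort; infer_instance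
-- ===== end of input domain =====

-- B replaces A's three running dicts (max-gap, last-seen, sentinel compare) by one positions
-- dict built in a single pass plus a zip over adjacent pairs; objective: simpler decomposition.


-- ===== PORT A =====
-- loop body of A's single for-loop, on the state (max_delta, observation, score, previous_gift)
def evalStepA (st : PySem.Dict Int Int × PySem.Dict Int Int × Int × Option Int)
    (p : Int × Int) : PySem.Dict Int Int × PySem.Dict Int Int × Int × Option Int :=
  let md := st.1
  let obs := st.2.1
  let score := st.2.2.1
  let prev := st.2.2.2
  let obs1 := if obs.contains p.2 then obs else obs.insert p.2 p.1
  let md1 := if md.contains p.2 then md else md.insert p.2 0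
  let md2 := md1.insert p.2 (max (md1.getD p.2 0) (p.1 - obs1.getD p.2 0 - 1))
  let obs2 := obs1.insert p.2 p.1
  let score2 := if prev == some p.2 then score + 100 else score
  (md2, obs2, score2, some p.2)

def evaluate_sort (giftorder : List Int) : Int :=
  let st := (PySem.List.enumerate giftorder).foldl evalStepA
    (PySem.Dict.empty, PySem.Dict.empty, 0, none)
  st.2.2.1 + st.1.values.sum

-- ===== PORT B =====
-- _gap_score of Source B: fold of max over adjacent index pairs, starting at 0
def gapScore (idx : List Int) : Int :=
  (idx.zip (idx.drop 1)).foldl (fun m p => max m (p.2 - p.1 - 1)) 0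

def evaluate_sort_alt (giftorder : List Int) : Int :=
  let positions := (PySem.List.enumerate giftorder).foldl
    (fun (d : PySem.Dict Int (List Int)) p => d.modify p.2 [] (· ++ [p.1]))
    PySem.Dict.empty
  let score := 100 *
    (((giftorder.zip (giftorder.drop 1)).map (fun p => if p.1 == p.2 then (1 : Int) else 0)).sum)
  positions.values.foldl (fun s idx => s + gapScore idx) score

-- ===== PRECONDITION & SPEC =====
def Spec_evaluate_sort (giftorder : List Int) (out : Int) : Prop := out = evaluate_sort_alt giftorder
instance (giftorder : List Int) (out : Int) : Decidable (Spec_evaluate_sort giftorder out) := by unfold Spec_evaluate_sort; infer_instance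

-- ===== CLAIM (what is proved, stated in full; the proofs are below) =====
def Claim_equal_evaluate_sort : Prop := ∀ (giftorder : List Int), Dom_evaluate_sort giftorder → Spec_evaluate_sort giftorder (evaluate_sort giftorder)

-- ===== LEMMAS AND PROOFS =====

-- A's running duplicate score, as a recursion over the rest of the list
def dcount : Option Int → List Int → Int
  | _, [] => 0
  | pv, x :: xs => (if pv == some x then 100 else 0) + dcount (some x) xs

theorem dcount_some (l : List Int) (a : Int) :
    dcount (some a) l =
      100 * (((a :: l).zip l).map (fun p => if p.1 == p.2 then (1 : Int) else 0)).sum := by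
  induction l generalizing a with
  | nil => simp [dcount]
  | cons x xs ih =>
    simp only [dcount, List.zip_cons_cons, List.map_cons, List.sum_cons, ih x]
    by_cases hax : a = x <;> (simp [hax]; try ring)

theorem dcount_none (l : List Int) :
    dcount none l =
      100 * ((l.zip (l.drop 1)).map (fun p => if p.1 == p.2 then (1 : Int) else 0)).sum := by
  cases l with
  | nil => simp [dcount]
  | cons x xs => simpa [dcount] using dcount_some xs x

theorem zipPairs_append (l : List Int) (s : Int) (h : l ≠ []) :
    (l ++ [s]).zip (l ++ [s]).tail = (l.zip l.tail) ++ [(l.getLastD 0, s)] := by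
  induction l with
  | nil => simp at h
  | cons a t ih =>
    cases t with
    | nil => simp
    | cons b t' =>
      have := ih (by simp)
      simp_all [List.getLastD]

theorem gapScore_append (l : List Int) (s : Int) (h : l ≠ []) :
    gapScore (l ++ [s]) = max (gapScore l) (s - l.getLastD 0 - 1) := by
  simp only [gapScore, List.drop_one, zipPairs_append l s h, List.foldl_append,
    List.foldl_cons, List.foldl_nil]

theorem gapScore_singleton (s : Int) : gapScore [s] = 0 := by simp [gapScore]

-- lookups through an items-level map that preserves keys
theorem contains_map_items {ν μ : Type} (pos : PySem.Dict Int ν) (md : PySem.Dict Int μ)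
    (f : ν → μ) (h : md.items = pos.items.map (fun p => (p.1, f p.2))) (k : Int) :
    md.contains k = pos.contains k := by
  simp [PySem.Dict.contains, h, List.any_map, Function.comp_def]

theorem get?_map_items {ν μ : Type} (pos : PySem.Dict Int ν) (md : PySem.Dict Int μ)
    (f : ν → μ) (h : md.items = pos.items.map (fun p => (p.1, f p.2))) (k : Int) :
    md.get? k = (pos.get? k).map f := by
  simp only [PySem.Dict.get?, h, List.find?_map]
  have : ((fun (p : Int × μ) => p.1 == k) ∘ fun p : Int × ν => (p.1, f p.2)) =
      (fun (p : Int × ν) => p.1 == k) := by funext p; rfl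
  rw [this]
  cases pos.items.find? (fun p => p.1 == k) <;> rfl

-- the main loop invariant: A's (max_delta, observation, score) against B's positions dict
theorem main_inv (rest : List Int) : ∀ (s : Int) (md obs : PySem.Dict Int Int) (sc : Int)
    (pv : Option Int) (pos : PySem.Dict Int (List Int)),
    md.items = pos.items.map (fun p => (p.1, gapScore p.2)) →
    obs.items = pos.items.map (fun p => (p.1, p.2.getLastD 0)) →
    (∀ p ∈ pos.items, p.2 ≠ []) →
    (((PySem.List.enumerate rest s).foldl evalStepA (md, obs, sc, pv)).1.items =
      ((PySem.List.enumerate rest s).foldl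
        (fun (d : PySem.Dict Int (List Int)) p => d.modify p.2 [] (· ++ [p.1])) pos).items.map
        (fun p => (p.1, gapScore p.2)) ∧
     ((PySem.List.enumerate rest s).foldl evalStepA (md, obs, sc, pv)).2.2.1 =
      sc + dcount pv rest) := by
  induction rest with
  | nil =>
    intro s md obs sc pv pos hmd hobs hne
    simp only [PySem.List.enumerate_nil, List.foldl_nil, dcount]
    exact ⟨hmd, by ring⟩
  | cons g rest ih =>
    intro s md obs sc pv pos hmd hobs hne
    rw [PySem.List.enumerate_cons]
    simp only [List.foldl_cons]
    have hcm : md.contains g = pos.contains g := contains_map_items pos md (fun l => gapScore l) hmd g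
    have hco : obs.contains g = pos.contains g := contains_map_items pos obs (fun l => l.getLastD 0) hobs g
    by_cases hc : pos.contains g = true
    · -- gift already seen: md/obs untouched by the setdefault branches, then overwritten
      obtain ⟨l, hl⟩ : ∃ l, pos.get? g = some l := by
        have := PySem.Dict.contains_eq_isSome_get? (d := pos) (k := g)
        rw [hc] at this
        exact Option.isSome_iff_exists.mp this.symm
      have hlne : l ≠ [] := hne (g, l) (PySem.Dict.mem_items_of_get?_eq_some pos hl)
      have hmdg : md.getD g 0 = gapScore l := by
        have := get?_map_items pos md (fun l => gapScore l) hmd g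
        rw [hl] at this
        simp [PySem.Dict.getD_eq_get?_getD, this]
      have hobsg : obs.getD g 0 = l.getLastD 0 := by
        have := get?_map_items pos obs (fun l => l.getLastD 0) hobs g
        rw [hl] at this
        simp [PySem.Dict.getD_eq_get?_getD, this]
      have hstep : evalStepA (md, obs, sc, pv) (s, g) =
          (md.insert g (gapScore (l ++ [s])), obs.insert g s,
            (if pv == some g then sc + 100 else sc), some g) := by
        simp only [evalStepA, hcm, hco, hc, if_true, hmdg, hobsg,
          gapScore_append l s hlne]
      rw [hstep]
      have hmod : pos.modify g [] (· ++ [s]) = pos.insert g (l ++ [s]) := by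
        simp [PySem.Dict.modify, PySem.Dict.getD_eq_get?_getD, hl]
      have h1 : (md.insert g (gapScore (l ++ [s]))).items =
          (pos.insert g (l ++ [s])).items.map (fun p => (p.1, gapScore p.2)) := by
        rw [PySem.Dict.items_insert_of_contains md _ (by rw [hcm]; exact hc),
          PySem.Dict.items_insert_of_contains pos _ hc, hmd, List.map_map, List.map_map]
        refine List.map_congr_left ?_
        intro p _
        by_cases hpg : p.1 = g <;> simp [Function.comp, hpg]
      have h2 : (obs.insert g s).items =
          (pos.insert g (l ++ [s])).items.map (fun p => (p.1, p.2.getLastD 0)) := by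
        rw [PySem.Dict.items_insert_of_contains obs _ (by rw [hco]; exact hc),
          PySem.Dict.items_insert_of_contains pos _ hc, hobs, List.map_map, List.map_map]
        refine List.map_congr_left ?_
        intro p _
        by_cases hpg : p.1 = g <;> simp [Function.comp, hpg]
      have h3 : ∀ p ∈ (pos.insert g (l ++ [s])).items, p.2 ≠ [] := by
        intro p hp
        rcases (PySem.Dict.mem_items_insert _ _ _ _).mp hp with h | h
        · subst h; simp
        · exact hne p h.1
      have := ih (s + 1) _ _ (if pv == some g then sc + 100 else sc) (some g) _ h1 h2 h3
      rw [hmod]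
      refine ⟨this.1, ?_⟩
      rw [this.2]
      simp only [dcount]
      split_ifs <;> ring
    · -- first occurrence of the gift: every dict appends a fresh key
      have hc' : pos.contains g = false := by simpa using hc
      have hstep : evalStepA (md, obs, sc, pv) (s, g) =
          (md.insert g 0, obs.insert g s,
            (if pv == some g then sc + 100 else sc), some g) := by
        have h1 : (md.insert g 0).getD g 0 = 0 := by
          simp [PySem.Dict.getD_insert_self]
        have h2 : (obs.insert g s).getD g 0 = s := by
          simp [PySem.Dict.getD_insert_self]
        simp only [evalStepA, hcm, hco, hc', if_false, Bool.false_eq_true, h1, h2]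
        have : max (0 : Int) (s - s - 1) = 0 := by omega
        rw [this, PySem.Dict.insert_insert_self, PySem.Dict.insert_insert_self]
      rw [hstep]
      have hmod : pos.modify g [] (· ++ [s]) = pos.insert g [s] := by
        simp [PySem.Dict.modify, PySem.Dict.getD_of_not_contains pos [] hc']
      have h1 : (md.insert g 0).items =
          (pos.insert g [s]).items.map (fun p => (p.1, gapScore p.2)) := by
        rw [PySem.Dict.items_insert_of_not_contains md 0 (by rw [hcm]; exact hc'),
          PySem.Dict.items_insert_of_not_contains pos [s] hc', List.map_append, hmd]
        simp [gapScore_singleton]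
      have h2 : (obs.insert g s).items =
          (pos.insert g [s]).items.map (fun p => (p.1, p.2.getLastD 0)) := by
        rw [PySem.Dict.items_insert_of_not_contains obs s (by rw [hco]; exact hc'),
          PySem.Dict.items_insert_of_not_contains pos [s] hc', List.map_append, hobs]
        simp
      have h3 : ∀ p ∈ (pos.insert g [s]).items, p.2 ≠ [] := by
        intro p hp
        rcases (PySem.Dict.mem_items_insert _ _ _ _).mp hp with h | h
        · subst h; simp
        · exact hne p h.1
      have := ih (s + 1) _ _ (if pv == some g then sc + 100 else sc) (some g) _ h1 h2 h3
      rw [hmod]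
      refine ⟨this.1, ?_⟩
      rw [this.2]
      simp only [dcount]
      split_ifs <;> ring

-- ===== VERDICT (by name: the statement is the Claim_ definition above) =====
theorem evaluate_sort_spec : Claim_equal_evaluate_sort := by
  intro giftorder _
  unfold Spec_evaluate_sort
  have h := main_inv giftorder 0 PySem.Dict.empty PySem.Dict.empty 0 none PySem.Dict.empty
    (by rfl) (by rfl) (by intro p hp; simp [PySem.Dict.empty] at hp)
  simp only [evaluate_sort, evaluate_sort_alt]
  rw [PySem.List.foldl_add]
  set Q := (PySem.List.enumerate giftorder).foldl
    (fun (d : PySem.Dict Int (List Int)) p => d.modify p.2 [] (· ++ [p.1])) PySem.Dict.empty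
  have hvals : ((PySem.List.enumerate giftorder).foldl evalStepA
      (PySem.Dict.empty, PySem.Dict.empty, 0, none)).1.values = Q.values.map gapScore := by
    simp [PySem.Dict.values, h.1, List.map_map, Function.comp]
  rw [hvals, h.2, dcount_none]
  ring
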